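-- pv_equiv track=rewrite | github.com/chudinhhuan/PYTHON | progaming/bai2.py | bai3
-- ===== SOURCE A (Python) =====
-- word1 = ''
--
-- word2 = 'abaaac'
--
-- def bai3(word1,word2):
--     a = []
--     b=[]
--     for i in word1:
--         a.append(i)
--     for j in word2:
--         b.append(j)
--     dem = 0
--     for i in range(len(a)):
--         for j in range(len(b)):
--             if a[i] == b[j]:
--                 dem += 1
--     dem = dem // 2
--     flag = False
--     if dem >= 3:
--         flag = True
--     return flag
-- ===== SOURCE B (Python) =====
-- def bai3(word1, word2):
--     c1 = {}
--     for ch in word1: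
--         c1[ch] = c1.get(ch, 0) + 1
--     c2 = {}
--     for ch in word2:
--         c2[ch] = c2.get(ch, 0) + 1
--     total = 0
--     for ch, n in c1.items():
--         total += n * c2.get(ch, 0)
--     return total // 2 >= 3
-- ===== Notes on version B (the rewrite author's own statement) =====
-- stated objective: faster
-- what changed: Replaces the O(n*m) nested scan comparing every character pair with frequency dictionaries built in one pass each, summing products of matching counts.
import Mathlib
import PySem

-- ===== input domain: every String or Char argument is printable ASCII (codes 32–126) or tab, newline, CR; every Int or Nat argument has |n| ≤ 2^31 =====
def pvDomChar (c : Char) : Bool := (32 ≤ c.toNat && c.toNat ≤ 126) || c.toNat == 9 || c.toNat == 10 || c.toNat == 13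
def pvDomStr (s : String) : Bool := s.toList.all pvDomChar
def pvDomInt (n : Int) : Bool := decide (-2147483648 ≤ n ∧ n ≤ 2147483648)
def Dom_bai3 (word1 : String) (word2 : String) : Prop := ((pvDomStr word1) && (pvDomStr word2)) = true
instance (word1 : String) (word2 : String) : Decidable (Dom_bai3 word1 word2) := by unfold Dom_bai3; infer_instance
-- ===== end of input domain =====

-- B replaces A's nested character-pair scan with per-string frequency dictionaries (asymptotically faster).
-- ===== PORT A =====
def bai3 (word1 : String) (word2 : String) : Bool :=
  let a := word1.toList.foldl (fun acc i => acc ++ [i]) []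
  let b := word2.toList.foldl (fun acc j => acc ++ [j]) []
  let dem : Int := (PySem.List.pyRange 0 (a.length : Int) 1).foldl (fun dem i =>
    (PySem.List.pyRange 0 (b.length : Int) 1).foldl (fun dem j =>
      if PySem.List.pyGetD a i ' ' == PySem.List.pyGetD b j ' ' then dem + 1 else dem) dem) 0
  let dem := PySem.Int.floordiv dem 2
  let flag := false
  if dem ≥ 3 then true else flag

-- ===== PORT B =====
def bai3_alt (word1 : String) (word2 : String) : Bool :=
  let c1 := word1.toList.foldl (fun d ch => d.insert ch (d.getD ch 0 + 1)) (PySem.Dict.empty : PySem.Dict Char Int)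
  let c2 := word2.toList.foldl (fun d ch => d.insert ch (d.getD ch 0 + 1)) (PySem.Dict.empty : PySem.Dict Char Int)
  let total : Int := c1.items.foldl (fun s p => s + p.2 * c2.getD p.1 0) 0
  decide (PySem.Int.floordiv total 2 ≥ 3)

-- ===== PRECONDITION & SPEC =====
def Spec_bai3 (word1 : String) (word2 : String) (out : Bool) : Prop := out = bai3_alt word1 word2
instance (word1 : String) (word2 : String) (out : Bool) : Decidable (Spec_bai3 word1 word2 out) := by unfold Spec_bai3; infer_instance

-- ===== CLAIM (what is proved, stated in full; the proofs are below) =====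
def Claim_equal_bai3 : Prop := ∀ (word1 : String) (word2 : String), Dom_bai3 word1 word2 → Spec_bai3 word1 word2 (bai3 word1 word2)

-- ===== LEMMAS AND PROOFS =====

-- ===== VERDICT (by name: the statement is the Claim_ definition above) =====
-- sum over all characters of a of their count in b  =  sum over distinct characters of count*count
lemma sum_count_eq_dedup_sum (a b : List Char) :
    (a.map (fun x => (b.count x : Int))).sum
      = ((PySem.Set.ofList a).map (fun k => (a.count k : Int) * (b.count k : Int))).sum := by
  have h1 : (a.map (fun x => (b.count x : Int))).sum
      = ∑ m ∈ a.toFinset, a.count m • (b.count m : Int) :=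
    Finset.sum_list_map_count a _
  have hnd := PySem.Set.nodup_ofList (xs := a)
  have h2 : ((PySem.Set.ofList a).map (fun k => (a.count k : Int) * (b.count k : Int))).sum
      = ∑ m ∈ (PySem.Set.ofList a).toFinset, (a.count m : Int) * (b.count m : Int) :=
    (List.sum_toFinset _ hnd).symm
  have h3 : (PySem.Set.ofList a).toFinset = a.toFinset := by
    ext x; simp [PySem.Set.mem_ofList]
  rw [h1, h2, h3]
  refine Finset.sum_congr rfl fun m hm => ?_
  simp

lemma bai3_eq_alt (word1 word2 : String) : bai3 word1 word2 = bai3_alt word1 word2 := by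
  unfold bai3 bai3_alt
  simp only [PySem.List.foldl_append_singleton_eq_self, List.nil_append,
    PySem.Dict.foldl_insert_getD_add_one_eq_counter]
  have hinner : ∀ (x : Char) (dem : Int),
      (PySem.List.pyRange 0 (word2.toList.length : Int) 1).foldl
        (fun dem j => if x == PySem.List.pyGetD word2.toList j ' ' then dem + 1 else dem) dem
      = dem + (word2.toList.count x : Int) := by
    intro x dem
    rw [PySem.List.foldl_pyRange_zero_pyGetD' word2.toList ' '
      (fun dem y => if x == y then dem + 1 else dem) dem]
    have hf : (fun (dem : Int) y => if x == y then dem + 1 else dem)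
        = fun (dem : Int) y => if y == x then dem + 1 else dem := by
      funext dem y
      by_cases h : x = y
      · simp [h]
      · simp [beq_iff_eq, h, Ne.symm h]
    rw [hf, PySem.List.foldl_beq_add_one]
  rw [PySem.List.foldl_pyRange_zero_pyGetD' word1.toList ' '
    (fun dem x => (PySem.List.pyRange 0 (word2.toList.length : Int) 1).foldl
      (fun dem j => if x == PySem.List.pyGetD word2.toList j ' ' then dem + 1 else dem) dem) 0]
  have houter : word1.toList.foldl
      (fun dem x => (PySem.List.pyRange 0 (word2.toList.length : Int) 1).foldl
        (fun dem j => if x == PySem.List.pyGetD word2.toList j ' ' then dem + 1 else dem) dem) 0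
      = word1.toList.foldl (fun acc x => acc + (word2.toList.count x : Int)) 0 := by
    apply PySem.List.foldl_congr_mem
    intro acc x _
    exact hinner x acc
  rw [houter, PySem.List.foldl_add]
  simp only [PySem.Dict.items_counter, List.foldl_map]
  have hB : (PySem.Set.ofList word1.toList).foldl
      (fun s k => s + (word1.toList.count k : Int) * (PySem.Dict.counter word2.toList).getD k 0) 0
      = (PySem.Set.ofList word1.toList).foldl
        (fun s k => s + (word1.toList.count k : Int) * (word2.toList.count k : Int)) 0 := by
    apply PySem.List.foldl_congr_mem
    intro s k _
    simp [PySem.Dict.getD_counter]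
  rw [hB, PySem.List.foldl_add]
  rw [zero_add, zero_add, sum_count_eq_dedup_sum word1.toList word2.toList]
  split_ifs with hc
  · exact (decide_eq_true hc).symm
  · exact (decide_eq_false hc).symm

theorem bai3_spec : Claim_equal_bai3 := by
  intro w1 w2 _
  unfold Spec_bai3
  exact bai3_eq_alt w1 w2
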